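-- pv_equiv track=rewrite | github.com/krishna-ji/timetable-engine | experiments/cpsat_oracle.py | compute_valid_starts_for_instructor
-- ===== SOURCE A (Python) =====
-- def compute_valid_starts(
--     duration: int, total_quanta: int, day_offsets: list[int], day_lengths: list[int]
-- ) -> list[int]:
--     """Start quanta where the session fits.
--
--     Sessions that fit within a single day must not cross day boundaries.
--     Sessions longer than a single day can span multiple days (continuous quanta).
--     """
--     min_day_len = min(day_lengths) if day_lengths else 7
--
--     if duration <= min_day_len:
--         # Single-day: must fit entirely within one day
--         valid: list[int] = []
--         for offset, length in zip(day_offsets, day_lengths):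
--             for s in range(offset, offset + length - duration + 1):
--                 valid.append(s)
--         return valid
--     else:
--         # Multi-day: can start anywhere that fits within total quanta
--         return list(range(0, total_quanta - duration + 1))
--
-- def compute_valid_starts_for_instructor(
--     duration: int,
--     instructor_available: set[int],
--     total_quanta: int,
--     day_offsets: list[int],
--     day_lengths: list[int],
-- ) -> list[int]:
--     """Starts where ALL quanta of the session are in instructor availability AND valid."""
--     base = compute_valid_starts(duration, total_quanta, day_offsets, day_lengths)
--     return [
--         s
--         for s in base
--         if all(q in instructor_available for q in range(s, s + duration))
--     ]
-- ===== SOURCE B (Python) =====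
-- def compute_valid_starts_for_instructor(
--     duration,
--     instructor_available,
--     total_quanta,
--     day_offsets,
--     day_lengths,
-- ):
--     """Starts where ALL quanta of the session are available and valid.
--
--     Instead of scanning the whole duration-long window for every candidate
--     start, precompute for every available quantum the end of its maximal run
--     of consecutive available quanta; a window check is then one dict lookup.
--     """
--     min_day_len = min(day_lengths) if day_lengths else 7
--     if duration <= min_day_len:
--         base = [
--             s
--             for offset, length in zip(day_offsets, day_lengths)
--             for s in range(offset, offset + length - duration + 1)
--         ]
--     else:
--         base = list(range(0, total_quanta - duration + 1))
--     if duration <= 0: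
--         return base  # empty window: every base start is trivially covered
--     run_end = {}
--     for q in sorted(instructor_available, reverse=True):
--         run_end[q] = run_end.get(q + 1, q)
--     last = duration - 1
--     return [s for s in base if s in run_end and run_end[s] >= s + last]
-- ===== Notes on version B (the rewrite author's own statement) =====
-- stated objective: alternative
-- what changed: Replaces the per-start window scan over the availability set by a precomputed run-end dictionary (consecutive-run ends of the sorted availability), so each candidate start is checked with a single dict lookup; per-start cost trades O(duration) scanning for dict construction.
import Mathlib
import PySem

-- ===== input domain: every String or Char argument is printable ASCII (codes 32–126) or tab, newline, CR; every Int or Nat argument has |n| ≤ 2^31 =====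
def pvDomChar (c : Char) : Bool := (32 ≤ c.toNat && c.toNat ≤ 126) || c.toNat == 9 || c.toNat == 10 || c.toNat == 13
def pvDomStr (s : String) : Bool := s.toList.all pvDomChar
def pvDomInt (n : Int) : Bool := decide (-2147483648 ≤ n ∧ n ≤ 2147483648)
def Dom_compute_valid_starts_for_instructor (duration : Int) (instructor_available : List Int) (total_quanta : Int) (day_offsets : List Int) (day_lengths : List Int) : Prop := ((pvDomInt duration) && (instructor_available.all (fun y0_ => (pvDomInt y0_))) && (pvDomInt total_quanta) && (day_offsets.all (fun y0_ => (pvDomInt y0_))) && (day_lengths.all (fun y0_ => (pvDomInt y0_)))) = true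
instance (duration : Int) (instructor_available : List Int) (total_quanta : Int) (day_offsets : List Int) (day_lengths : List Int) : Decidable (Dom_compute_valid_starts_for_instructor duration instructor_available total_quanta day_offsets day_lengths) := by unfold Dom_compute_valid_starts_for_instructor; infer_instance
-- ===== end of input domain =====

-- B checks each candidate start with one lookup in a precomputed run-end dictionary
-- instead of A's per-start scan of the whole window (alternative algorithm).

-- ===== PORT A =====
-- helper compute_valid_starts of A
def pvA_compute_valid_starts (duration : Int) (total_quanta : Int) (day_offsets : List Int) (day_lengths : List Int) : List Int :=
  let min_day_len := match PySem.List.min? day_lengths (fun x => x) with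
    | some m => m
    | none => 7
  if duration ≤ min_day_len then
    (day_offsets.zip day_lengths).foldl
      (fun valid p => valid ++ PySem.List.pyRange p.1 (p.1 + p.2 - duration + 1) 1) []
  else
    PySem.List.pyRange 0 (total_quanta - duration + 1) 1

def compute_valid_starts_for_instructor (duration : Int) (instructor_available : List Int) (total_quanta : Int) (day_offsets : List Int) (day_lengths : List Int) : List Int :=
  let base := pvA_compute_valid_starts duration total_quanta day_offsets day_lengths
  base.filter (fun s =>
    (PySem.List.pyRange s (s + duration) 1).all (fun q => instructor_available.contains q))

-- ===== PORT B =====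
-- run_end dict: for each available quantum q, the end of its maximal run of
-- consecutive available quanta (built scanning the set in descending order)
def pvB_runEnd (instructor_available : List Int) : PySem.Dict Int Int :=
  (PySem.List.sorted instructor_available (fun x => x) true).foldl
    (fun d q => d.insert q (d.getD (q + 1) q)) PySem.Dict.empty

def compute_valid_starts_for_instructor_alt (duration : Int) (instructor_available : List Int) (total_quanta : Int) (day_offsets : List Int) (day_lengths : List Int) : List Int :=
  let min_day_len := match PySem.List.min? day_lengths (fun x => x) with
    | some m => m
    | none => 7
  let base :=
    if duration ≤ min_day_len then
      (day_offsets.zip day_lengths).flatMap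
        (fun p => PySem.List.pyRange p.1 (p.1 + p.2 - duration + 1) 1)
    else
      PySem.List.pyRange 0 (total_quanta - duration + 1) 1
  if duration ≤ 0 then base
  else
    let run_end := pvB_runEnd instructor_available
    base.filter (fun s =>
      match run_end.get? s with
      | some e => decide (s + (duration - 1) ≤ e)
      | none => false)

-- ===== PRECONDITION & SPEC =====
def Spec_compute_valid_starts_for_instructor (duration : Int) (instructor_available : List Int) (total_quanta : Int) (day_offsets : List Int) (day_lengths : List Int) (out : List Int) : Prop := out = compute_valid_starts_for_instructor_alt duration instructor_available total_quanta day_offsets day_lengths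
instance (duration : Int) (instructor_available : List Int) (total_quanta : Int) (day_offsets : List Int) (day_lengths : List Int) (out : List Int) : Decidable (Spec_compute_valid_starts_for_instructor duration instructor_available total_quanta day_offsets day_lengths out) := by unfold Spec_compute_valid_starts_for_instructor; infer_instance

-- ===== CLAIM (what is proved, stated in full; the proofs are below) =====
def Claim_equal_compute_valid_starts_for_instructor : Prop := ∀ (duration : Int) (instructor_available : List Int) (total_quanta : Int) (day_offsets : List Int) (day_lengths : List Int), Dom_compute_valid_starts_for_instructor duration instructor_available total_quanta day_offsets day_lengths → Spec_compute_valid_starts_for_instructor duration instructor_available total_quanta day_offsets day_lengths (compute_valid_starts_for_instructor duration instructor_available total_quanta day_offsets day_lengths)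

-- ===== LEMMAS AND PROOFS =====

-- characterization of a "good" run-end dict w.r.t. the availability list L
def pvGood (L : List Int) (d : PySem.Dict Int Int) : Prop :=
  ∀ q e, d.get? q = some e →
    q ∈ L ∧ q ≤ e ∧ (∀ t, q ≤ t → t ≤ e → t ∈ L) ∧ (e + 1) ∉ L

lemma pv_fold_inv (L : List Int) :
    ∀ (M : List Int) (d : PySem.Dict Int Int),
      (∀ x ∈ M, x ∈ L) →
      M.Pairwise (fun a b => b ≤ a) →
      pvGood L d →
      (∀ x ∈ L, d.contains x = true ∨ x ∈ M) →
      pvGood L (M.foldl (fun d q => d.insert q (d.getD (q + 1) q)) d) ∧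
      (∀ x ∈ L, (M.foldl (fun d q => d.insert q (d.getD (q + 1) q)) d).contains x = true) := by
  intro M
  induction M with
  | nil =>
    intro d _ _ hg hk
    refine ⟨hg, fun x hx => ?_⟩
    rcases hk x hx with h | h
    · exact h
    · simp at h
  | cons q rest ih =>
    intro d hsub hpw hg hk
    simp only [List.foldl_cons]
    have hqL : q ∈ L := hsub q (List.mem_cons_self ..)
    have hrest_le : ∀ y ∈ rest, y ≤ q := (List.pairwise_cons.mp hpw).1
    -- the new dict is good
    have hg' : pvGood L (d.insert q (d.getD (q + 1) q)) := by
      intro q' e hget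
      rw [PySem.Dict.get?_insert] at hget
      by_cases hq : q' = q
      · subst hq
        simp at hget
        rcases hq1 : d.get? (q' + 1) with _ | e1
        · -- q'+1 not yet keyed: q'+1 ∉ L, run end is q' itself
          have hval : d.getD (q' + 1) q' = q' := PySem.Dict.getD_of_get?_eq_none _ _ hq1
          rw [hval] at hget
          subst hget
          have hq1L : (q' + 1) ∉ L := by
            intro hmem
            rcases hk _ hmem with hc | hm
            · rw [PySem.Dict.contains_eq_isSome_get?, hq1] at hc
              simp at hc
            · rcases List.mem_cons.mp hm with h | h
              · omega
              · have := hrest_le _ h; omega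
          exact ⟨hqL, le_refl _, fun t h1 h2 => by
            have : t = q' := le_antisymm h2 h1
            exact this ▸ hqL, hq1L⟩
        · have hval : d.getD (q' + 1) q' = e1 := PySem.Dict.getD_of_get?_eq_some _ _ hq1
          rw [hval] at hget
          subst hget
          obtain ⟨h1L, h1le, h1int, h1end⟩ := hg _ _ hq1
          refine ⟨hqL, by omega, fun t ht1 ht2 => ?_, h1end⟩
          by_cases htq : t = q'
          · exact htq ▸ hqL
          · exact h1int t (by omega) ht2
      · simp only [if_neg hq] at hget
        exact hg _ _ hget
    have hk' : ∀ x ∈ L, (d.insert q (d.getD (q + 1) q)).contains x = true ∨ x ∈ rest := by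
      intro x hx
      rcases hk x hx with hc | hm
      · left
        rw [PySem.Dict.contains_insert, hc]
        simp
      · rcases List.mem_cons.mp hm with h | h
        · left; subst h; exact PySem.Dict.contains_insert_self ..
        · right; exact h
    exact ih _ (fun x hx => hsub x (List.mem_cons_of_mem _ hx)) (List.pairwise_cons.mp hpw).2 hg' hk'

lemma pv_runEnd_good (L : List Int) :
    pvGood L (pvB_runEnd L) ∧ (∀ x ∈ L, (pvB_runEnd L).contains x = true) := by
  unfold pvB_runEnd
  apply pv_fold_inv
  · intro x hx; exact (PySem.List.mem_sorted ..).mp hx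
  · exact PySem.List.sorted_pairwise_rev ..
  · intro q e hget; rw [PySem.Dict.get?_empty] at hget; cases hget
  · intro x hx; right; exact (PySem.List.mem_sorted ..).mpr hx

-- pointwise equality of the two filter predicates, for duration ≥ 1
lemma pv_pred_eq (L : List Int) (duration : Int) (hd : 1 ≤ duration) (s : Int) :
    ((PySem.List.pyRange s (s + duration) 1).all (fun q => L.contains q)) =
    (match (pvB_runEnd L).get? s with
     | some e => decide (s + (duration - 1) ≤ e)
     | none => false) := by
  obtain ⟨hgood, hkeys⟩ := pv_runEnd_good L
  have hall : ((PySem.List.pyRange s (s + duration) 1).all (fun q => L.contains q)) = true ↔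
      (∀ t, s ≤ t → t < s + duration → t ∈ L) := by
    simp [List.all_eq_true, PySem.List.mem_pyRange_one]
  rcases hget : (pvB_runEnd L).get? s with _ | e
  · simp only
    rw [Bool.eq_false_iff]
    intro hcontra
    have hs : s ∈ L := hall.mp hcontra s (le_refl _) (by omega)
    have := hkeys s hs
    rw [PySem.Dict.contains_eq_isSome_get?, hget] at this
    simp at this
  · simp only
    obtain ⟨hsL, hse, hint, hend⟩ := hgood _ _ hget
    by_cases hfit : s + (duration - 1) ≤ e
    · rw [decide_eq_true hfit, hall.symm.mp]
      intro t ht1 ht2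
      exact hint t ht1 (by omega)
    · rw [decide_eq_false hfit, Bool.eq_false_iff]
      intro hcontra
      exact hend (hall.mp hcontra (e + 1) (by omega) (by omega))

lemma pv_base_eq (duration : Int) (total_quanta : Int) (day_offsets : List Int) (day_lengths : List Int) :
    pvA_compute_valid_starts duration total_quanta day_offsets day_lengths =
    (if duration ≤ (match PySem.List.min? day_lengths (fun x => x) with | some m => m | none => 7) then
      (day_offsets.zip day_lengths).flatMap
        (fun p => PySem.List.pyRange p.1 (p.1 + p.2 - duration + 1) 1)
    else
      PySem.List.pyRange 0 (total_quanta - duration + 1) 1) := by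
  unfold pvA_compute_valid_starts
  dsimp only
  split_ifs with h
  · rw [PySem.List.foldl_append_eq_flatMap]
    simp
  · rfl

-- ===== VERDICT (by name: the statement is the Claim_ definition above) =====
theorem compute_valid_starts_for_instructor_spec : Claim_equal_compute_valid_starts_for_instructor := by
  intro duration instructor_available total_quanta day_offsets day_lengths _
  unfold Spec_compute_valid_starts_for_instructor
  unfold compute_valid_starts_for_instructor compute_valid_starts_for_instructor_alt
  simp only [pv_base_eq]
  by_cases hd : duration ≤ 0
  · rw [if_pos hd]
    have : ∀ s : Int, ((PySem.List.pyRange s (s + duration) 1).all (fun q => instructor_available.contains q)) = true := by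
      intro s
      rw [PySem.List.pyRange_one_eq_nil (by omega)]
      rfl
    rw [List.filter_congr (fun s _ => this s), List.filter_true]
  · rw [if_neg hd]
    exact List.filter_congr (fun s _ => pv_pred_eq instructor_available duration (by omega) s)
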